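-- pv_equiv track=rewrite | github.com/nabuel/primer_parcial_Nahuel_Montero | Funciones.py | buscar_numero
-- ===== SOURCE A (Python) =====
-- def buscar_numero(lista: list,
--                   orden = False):
--     '''
--     Busca la posición del número menor de la lista. Si orden = True entonces buscar el número mayor.
--
--     Retorno: La posición del número.
--     '''
--     numero = lista[0]
--     indice = 0
--     if orden:
--         #Busca número mayor.
--         for i in range(len(lista)):
--             if numero < lista[i]:
--                 numero = lista[i]
--                 indice = i
--     else:
--         #Busca número menor.
--         for i in range(len(lista)):
--             if numero > lista[i]:
--                 numero = lista[i]
--                 indice = i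
--
--
--     return indice
-- ===== SOURCE B (Python) =====
-- def buscar_numero(lista: list, orden=False):
--     objetivo = max(lista) if orden else min(lista)
--     return lista.index(objetivo)
-- ===== Notes on version B (the rewrite author's own statement) =====
-- stated objective: idiomatic
-- what changed: Replaced the hand-rolled single scan that tracks both the extremal value and its index with a two-pass library decomposition: min()/max() finds the value, list.index() finds its first position.
import Mathlib
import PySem

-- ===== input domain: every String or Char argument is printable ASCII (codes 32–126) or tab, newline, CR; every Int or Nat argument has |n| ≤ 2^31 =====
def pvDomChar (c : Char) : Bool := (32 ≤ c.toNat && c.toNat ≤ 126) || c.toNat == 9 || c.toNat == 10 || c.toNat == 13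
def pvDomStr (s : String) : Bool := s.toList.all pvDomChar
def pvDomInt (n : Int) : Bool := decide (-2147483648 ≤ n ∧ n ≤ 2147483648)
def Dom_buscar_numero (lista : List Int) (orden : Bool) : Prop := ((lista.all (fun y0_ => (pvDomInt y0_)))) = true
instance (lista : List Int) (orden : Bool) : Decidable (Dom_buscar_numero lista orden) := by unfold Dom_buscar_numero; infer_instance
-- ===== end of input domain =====

-- B replaces A's single hand-rolled scan (tracking value and index together) by the idiomatic
-- two-pass decomposition: find the extremal value with min/max, then its first index.

-- ===== PORT A =====
def buscar_numero (lista : List Int) (orden : Bool) : Int :=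
  match lista with
  | [] => 0   -- Python: lista[0] raises IndexError; excluded by Pre_
  | x :: _ =>
    if orden then
      ((List.range lista.length).foldl
        (fun p i => if p.1 < lista.getD i 0 then (lista.getD i 0, (i : Int)) else p) (x, 0)).2
    else
      ((List.range lista.length).foldl
        (fun p i => if p.1 > lista.getD i 0 then (lista.getD i 0, (i : Int)) else p) (x, 0)).2

-- ===== PORT B =====
def buscar_numero_alt (lista : List Int) (orden : Bool) : Int :=
  match (if orden then PySem.List.max? lista (fun y => y) else PySem.List.min? lista (fun y => y)) with
  | none => 0   -- Python: min()/max() of [] raises ValueError; excluded by Pre_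
  | some objetivo =>
    match PySem.List.index? lista objetivo with
    | some i => (i : Int)
    | none => 0   -- unreachable: the extremal value is a member of the list

-- ===== PRECONDITION & SPEC =====
-- Pre_ excludes exactly the empty list, on which Python A raises IndexError (B raises ValueError).
def Pre_buscar_numero (lista : List Int) (orden : Bool) : Prop := lista ≠ []
instance (lista : List Int) (orden : Bool) : Decidable (Pre_buscar_numero lista orden) := by unfold Pre_buscar_numero; infer_instance
def pvWitness_buscar_numero : List Int × Bool := ([3, 1, 4, 1], true)

def Spec_buscar_numero (lista : List Int) (orden : Bool) (out : Int) : Prop := out = buscar_numero_alt lista orden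
instance (lista : List Int) (orden : Bool) (out : Int) : Decidable (Spec_buscar_numero lista orden out) := by unfold Spec_buscar_numero; infer_instance

-- ===== CLAIM (what is proved, stated in full; the proofs are below) =====
def Claim_equal_buscar_numero : Prop := ∀ (lista : List Int) (orden : Bool), Dom_buscar_numero lista orden → Pre_buscar_numero lista orden → Spec_buscar_numero lista orden (buscar_numero lista orden)

-- ===== LEMMAS AND PROOFS =====

-- prefix extremum of a nonempty list, as B's min?/max? compute it
def pvMax (l : List Int) : Int := match l with | [] => 0 | a :: r => r.foldl max a
def pvMin (l : List Int) : Int := match l with | [] => 0 | a :: r => r.foldl min a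

lemma pvMax_append_singleton (l : List Int) (hl : l ≠ []) (a : Int) :
    pvMax (l ++ [a]) = max (pvMax l) a := by
  cases l with
  | nil => exact absurd rfl hl
  | cons b r => simp [pvMax, List.foldl_append]

lemma pvMin_append_singleton (l : List Int) (hl : l ≠ []) (a : Int) :
    pvMin (l ++ [a]) = min (pvMin l) a := by
  cases l with
  | nil => exact absurd rfl hl
  | cons b r => simp [pvMin, List.foldl_append]

lemma le_pvMax (l : List Int) (hl : l ≠ []) : ∀ y ∈ l, y ≤ pvMax l := by
  cases l with
  | nil => exact absurd rfl hl
  | cons b r =>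
    intro y hy
    rcases List.mem_cons.1 hy with h | h
    · subst h; exact (PySem.List.le_foldl_max r y).1
    · exact (PySem.List.le_foldl_max r b).2 y h

lemma pvMin_le (l : List Int) (hl : l ≠ []) : ∀ y ∈ l, pvMin l ≤ y := by
  cases l with
  | nil => exact absurd rfl hl
  | cons b r =>
    intro y hy
    rcases List.mem_cons.1 hy with h | h
    · subst h; exact (PySem.List.foldl_min_le r y).1
    · exact (PySem.List.foldl_min_le r b).2 y h

lemma pvMax_mem (l : List Int) (hl : l ≠ []) : pvMax l ∈ l := by
  cases l with
  | nil => exact absurd rfl hl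
  | cons b r =>
    rcases PySem.List.foldl_max_mem r b with h | h
    · simp [pvMax, h]
    · simp [pvMax]; right; exact h

lemma pvMin_mem (l : List Int) (hl : l ≠ []) : pvMin l ∈ l := by
  cases l with
  | nil => exact absurd rfl hl
  | cons b r =>
    rcases PySem.List.foldl_min_mem r b with h | h
    · simp [pvMin, h]
    · simp [pvMin]; right; exact h

-- reduce B's inner match once its index? lookup is known
lemma pv_alt_match (lista : List Int) (v : Int) (k : Nat)
    (hm : PySem.List.index? lista v = some k) :
    (match PySem.List.index? lista v with
     | some i => (i : Int)
     | none => 0) = (k : Int) := by rw [hm]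

-- invariant of A's scan: after processing indices 0..n-1 the state is the prefix extremum
-- together with its first index in the prefix
lemma fold_max_inv (x : Int) (t : List Int) (n : Nat) (h1 : 1 ≤ n) (h2 : n ≤ (x :: t).length) :
    ((List.range n).foldl
        (fun p i => if p.1 < (x :: t).getD i 0 then ((x :: t).getD i 0, (i : Int)) else p) (x, 0)).1
      = pvMax ((x :: t).take n) ∧
    ∃ k : Nat, PySem.List.index? ((x :: t).take n)
        (((List.range n).foldl
          (fun p i => if p.1 < (x :: t).getD i 0 then ((x :: t).getD i 0, (i : Int)) else p) (x, 0)).1)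
        = some k ∧
      ((List.range n).foldl
        (fun p i => if p.1 < (x :: t).getD i 0 then ((x :: t).getD i 0, (i : Int)) else p) (x, 0)).2
        = (k : Int) := by
  revert h1 h2
  induction n with
  | zero => intro h1 _; omega
  | succ m ih =>
    intro _ h2
    rcases Nat.eq_zero_or_pos m with hm | hm
    · subst hm
      refine ⟨?_, 0, ?_, ?_⟩ <;>
        simp [List.range_one, pvMax, PySem.List.index?_eq_idxOf?, List.idxOf?]
    · have hmlen : m < (x :: t).length := by omega
      obtain ⟨ih1, k, ihk, ih2⟩ := ih hm (le_of_lt hmlen)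
      have hget : (x :: t).getD m 0 = (x :: t)[m] := List.getD_eq_getElem _ 0 hmlen
      have htake : (x :: t).take (m + 1) = (x :: t).take m ++ [(x :: t)[m]] := by
        rw [List.take_add_one, List.getElem?_eq_getElem hmlen]; rfl
      have hlenm : ((x :: t).take m).length = m := by
        rw [List.length_take]; omega
      have hne : (x :: t).take m ≠ [] := by
        intro h; rw [h] at hlenm; simp at hlenm; omega
      rw [List.range_succ, List.foldl_append, List.foldl_cons, List.foldl_nil]
      set st := (List.range m).foldl
          (fun p i => if p.1 < (x :: t).getD i 0 then ((x :: t).getD i 0, (i : Int)) else p)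
          ((x : Int), (0 : Int))
      rw [htake, hget]
      by_cases hlt : st.1 < (x :: t)[m]
      · have hmax : pvMax ((x :: t).take m ++ [(x :: t)[m]]) = (x :: t)[m] := by
          rw [pvMax_append_singleton _ hne, ← ih1, max_eq_right hlt.le]
        have hnotmem : (x :: t)[m] ∉ (x :: t).take m := by
          intro hmem
          have hle := le_pvMax _ hne _ hmem
          rw [← ih1] at hle
          exact absurd hlt (not_lt.2 hle)
        refine ⟨?_, m, ?_, ?_⟩
        · rw [if_pos hlt]; exact hmax.symm
        · rw [if_pos hlt]
          simpa [hlenm] using PySem.List.index?_append_singleton_self _ _ hnotmem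
        · rw [if_pos hlt]
      · have hmax : pvMax ((x :: t).take m ++ [(x :: t)[m]]) = st.1 := by
          rw [pvMax_append_singleton _ hne, ← ih1, max_eq_left (not_lt.1 hlt)]
        have hmem : st.1 ∈ (x :: t).take m := by
          rw [ih1]; exact pvMax_mem _ hne
        refine ⟨?_, k, ?_, ?_⟩
        · rw [if_neg hlt]; exact hmax.symm
        · rw [if_neg hlt, PySem.List.index?_append_of_mem _ hmem]
          exact ihk
        · rw [if_neg hlt]; exact ih2

lemma fold_min_inv (x : Int) (t : List Int) (n : Nat) (h1 : 1 ≤ n) (h2 : n ≤ (x :: t).length) :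
    ((List.range n).foldl
        (fun p i => if p.1 > (x :: t).getD i 0 then ((x :: t).getD i 0, (i : Int)) else p) (x, 0)).1
      = pvMin ((x :: t).take n) ∧
    ∃ k : Nat, PySem.List.index? ((x :: t).take n)
        (((List.range n).foldl
          (fun p i => if p.1 > (x :: t).getD i 0 then ((x :: t).getD i 0, (i : Int)) else p) (x, 0)).1)
        = some k ∧
      ((List.range n).foldl
        (fun p i => if p.1 > (x :: t).getD i 0 then ((x :: t).getD i 0, (i : Int)) else p) (x, 0)).2
        = (k : Int) := by
  revert h1 h2
  induction n with
  | zero => intro h1 _; omega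
  | succ m ih =>
    intro _ h2
    rcases Nat.eq_zero_or_pos m with hm | hm
    · subst hm
      refine ⟨?_, 0, ?_, ?_⟩ <;>
        simp [List.range_one, pvMin, PySem.List.index?_eq_idxOf?, List.idxOf?]
    · have hmlen : m < (x :: t).length := by omega
      obtain ⟨ih1, k, ihk, ih2⟩ := ih hm (le_of_lt hmlen)
      have hget : (x :: t).getD m 0 = (x :: t)[m] := List.getD_eq_getElem _ 0 hmlen
      have htake : (x :: t).take (m + 1) = (x :: t).take m ++ [(x :: t)[m]] := by
        rw [List.take_add_one, List.getElem?_eq_getElem hmlen]; rfl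
      have hlenm : ((x :: t).take m).length = m := by
        rw [List.length_take]; omega
      have hne : (x :: t).take m ≠ [] := by
        intro h; rw [h] at hlenm; simp at hlenm; omega
      rw [List.range_succ, List.foldl_append, List.foldl_cons, List.foldl_nil]
      set st := (List.range m).foldl
          (fun p i => if p.1 > (x :: t).getD i 0 then ((x :: t).getD i 0, (i : Int)) else p)
          ((x : Int), (0 : Int))
      rw [htake, hget]
      by_cases hlt : st.1 > (x :: t)[m]
      · have hmax : pvMin ((x :: t).take m ++ [(x :: t)[m]]) = (x :: t)[m] := by
          rw [pvMin_append_singleton _ hne, ← ih1, min_eq_right (le_of_lt hlt)]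
        have hnotmem : (x :: t)[m] ∉ (x :: t).take m := by
          intro hmem
          have hle := pvMin_le _ hne _ hmem
          rw [← ih1] at hle
          exact absurd hlt (not_lt.2 hle)
        refine ⟨?_, m, ?_, ?_⟩
        · rw [if_pos hlt]; exact hmax.symm
        · rw [if_pos hlt]
          simpa [hlenm] using PySem.List.index?_append_singleton_self _ _ hnotmem
        · rw [if_pos hlt]
      · have hmax : pvMin ((x :: t).take m ++ [(x :: t)[m]]) = st.1 := by
          rw [pvMin_append_singleton _ hne, ← ih1, min_eq_left (not_lt.1 hlt)]
        have hmem : st.1 ∈ (x :: t).take m := by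
          rw [ih1]; exact pvMin_mem _ hne
        refine ⟨?_, k, ?_, ?_⟩
        · rw [if_neg hlt]; exact hmax.symm
        · rw [if_neg hlt, PySem.List.index?_append_of_mem _ hmem]
          exact ihk
        · rw [if_neg hlt]; exact ih2

-- ===== VERDICT (by name: the statement is the Claim_ definition above) =====
theorem buscar_numero_spec : Claim_equal_buscar_numero := by
  intro lista orden _hd hpre
  unfold Spec_buscar_numero
  cases lista with
  | nil => exact absurd rfl hpre
  | cons x t =>
    cases orden with
    | true =>
      obtain ⟨h1, k, hk, h2⟩ := fold_max_inv x t (x :: t).length (by simp) le_rfl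
      rw [List.take_length] at h1 hk
      simp only [buscar_numero, buscar_numero_alt, if_true]
      rw [PySem.List.max?_id_cons]
      have hfm : t.foldl max x = pvMax (x :: t) := rfl
      rw [hfm, ← h1]
      exact h2.trans (pv_alt_match _ _ _ hk).symm
    | false =>
      obtain ⟨h1, k, hk, h2⟩ := fold_min_inv x t (x :: t).length (by simp) le_rfl
      rw [List.take_length] at h1 hk
      simp only [buscar_numero, buscar_numero_alt, if_false, Bool.false_eq_true]
      rw [PySem.List.min?_id_cons]
      have hfm : t.foldl min x = pvMin (x :: t) := rfl
      rw [hfm, ← h1]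
      exact h2.trans (pv_alt_match _ _ _ hk).symm
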